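-- pv_equiv track=rewrite | github.com/annieetang/coda_backend | music/matrix.py | find_duplicate_length_ranges
-- ===== SOURCE A (Python) =====
-- from typing import Tuple, List, Dict, Set
--
-- def find_duplicate_length_ranges(durations_list: List[int]) -> List[Tuple[int, int, int]]:
--     """Find ranges of duplicate lengths in the durations list."""
--     windows = []
--     curr_val_count = 0
--     curr_val = -1
--     i = 0
--     j = 0
--
--     while j < len(durations_list):
--         if durations_list[j] > 0:
--             if curr_val < 0:
--                 curr_val = durations_list[j]
--                 curr_val_count += 1
--                 i = j
--             elif durations_list[j] == curr_val:
--                 curr_val_count += 1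
--             else:
--                 if curr_val_count > 1:
--                     windows.append((i, j, curr_val_count))
--                 curr_val = durations_list[j]
--                 curr_val_count = 1
--                 i = j
--         j += 1
--
--     if curr_val_count > 1:
--         windows.append((i, j, curr_val_count))
--
--     return windows
-- ===== SOURCE B (Python) =====
-- from itertools import groupby
-- from typing import Tuple, List
--
-- def find_duplicate_length_ranges(durations_list: List[int]) -> List[Tuple[int, int, int]]:
--     """Find ranges of duplicate lengths in the durations list (groupby version)."""
--     positives = [(i, v) for i, v in enumerate(durations_list) if v > 0]
--     groups = [list(g) for _, g in groupby(positives, key=lambda p: p[1])]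
--     next_starts = [g[0][0] for g in groups[1:]] + [len(durations_list)]
--     return [(g[0][0], nxt, len(g))
--             for g, nxt in zip(groups, next_starts)
--             if len(g) > 1]
-- ===== Notes on version B (the rewrite author's own statement) =====
-- stated objective: simpler
-- what changed: Replaces A's hand-maintained while-loop state machine (windows/curr_val/curr_val_count/i) by a declarative pipeline: filter the positive entries with their indices, group consecutive equal values with itertools.groupby, and emit (start, next_group_start_or_len, size) for each group of size > 1.
import Mathlib
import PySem

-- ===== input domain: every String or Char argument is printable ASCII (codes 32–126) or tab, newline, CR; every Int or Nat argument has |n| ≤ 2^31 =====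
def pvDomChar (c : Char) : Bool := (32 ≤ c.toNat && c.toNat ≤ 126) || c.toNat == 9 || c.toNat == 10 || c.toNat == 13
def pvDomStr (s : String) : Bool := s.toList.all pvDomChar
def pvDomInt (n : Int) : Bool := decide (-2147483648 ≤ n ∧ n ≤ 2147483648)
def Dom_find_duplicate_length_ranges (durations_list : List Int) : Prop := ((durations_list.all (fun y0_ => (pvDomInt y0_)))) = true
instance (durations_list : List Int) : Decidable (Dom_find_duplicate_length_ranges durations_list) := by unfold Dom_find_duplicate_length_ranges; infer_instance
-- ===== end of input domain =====

-- B replaces A's hand-maintained while-loop state machine by a filter + groupby decomposition (simpler); return value only, no mutation.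

-- ===== PORT A =====
-- loop body of A's while-loop (state: windows, curr_val_count, curr_val, i; jx = (j, durations_list[j]))
def pvStepA (st : List (Int × Int × Int) × Int × Int × Int) (jx : Int × Int) :
    List (Int × Int × Int) × Int × Int × Int :=
  let (windows, cnt, cv, i) := st
  if jx.2 > 0 then
    if cv < 0 then (windows, cnt + 1, jx.2, jx.1)
    else if jx.2 = cv then (windows, cnt + 1, cv, i)
    else ((if cnt > 1 then windows ++ [(i, jx.1, cnt)] else windows), 1, jx.2, jx.1)
  else st

-- the trailing 'if curr_val_count > 1: windows.append((i, j, curr_val_count))' with j = len(durations_list)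
def pvFinA (st : List (Int × Int × Int) × Int × Int × Int) (j : Int) : List (Int × Int × Int) :=
  if st.2.1 > 1 then st.1 ++ [(st.2.2.2, j, st.2.1)] else st.1

def find_duplicate_length_ranges (durations_list : List Int) : List (Int × Int × Int) :=
  pvFinA ((PySem.List.enumerate durations_list).foldl pvStepA ([], 0, -1, 0))
    (durations_list.length : Int)

-- ===== PORT B =====
-- itertools.groupby keyed on the value, each group materialized
def pyGroupBy : List (Int × Int) → List (List (Int × Int))
  | [] => []
  | p :: rest =>
      (p :: rest.takeWhile (fun q => q.2 == p.2)) ::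
      pyGroupBy (rest.dropWhile (fun q => q.2 == p.2))
termination_by l => l.length
decreasing_by
  simp only [List.length_cons]
  exact Nat.lt_succ_of_le (List.length_dropWhile_le _ _)

def find_duplicate_length_ranges_alt (durations_list : List Int) : List (Int × Int × Int) :=
  let positives := (PySem.List.enumerate durations_list).filter (fun p => p.2 > 0)
  let groups := pyGroupBy positives
  let nextStarts := groups.tail.map (fun g => g.headI.1) ++ [(durations_list.length : Int)]
  (groups.zip nextStarts).filterMap (fun gn =>
    if gn.1.length > 1 then some (gn.1.headI.1, gn.2, (gn.1.length : Int)) else none)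

-- ===== PRECONDITION & SPEC =====
def Spec_find_duplicate_length_ranges (durations_list : List Int) (out : List (Int × Int × Int)) : Prop := out = find_duplicate_length_ranges_alt durations_list
instance (durations_list : List Int) (out : List (Int × Int × Int)) : Decidable (Spec_find_duplicate_length_ranges durations_list out) := by unfold Spec_find_duplicate_length_ranges; infer_instance

-- ===== CLAIM (what is proved, stated in full; the proofs are below) =====
def Claim_equal_find_duplicate_length_ranges : Prop := ∀ (durations_list : List Int), Dom_find_duplicate_length_ranges durations_list → Spec_find_duplicate_length_ranges durations_list (find_duplicate_length_ranges durations_list)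

-- ===== LEMMAS AND PROOFS =====

-- B's output as a function of the group list (proof abbreviation for B's tail computation)
def pvOut (G : List (List (Int × Int))) (L : Int) : List (Int × Int × Int) :=
  (G.zip (G.tail.map (fun g => g.headI.1) ++ [L])).filterMap (fun gn =>
    if gn.1.length > 1 then some (gn.1.headI.1, gn.2, (gn.1.length : Int)) else none)

lemma alt_eq_pvOut (l : List Int) :
    find_duplicate_length_ranges_alt l =
      pvOut (pyGroupBy ((PySem.List.enumerate l).filter (fun p => p.2 > 0))) (l.length : Int) := rfl

-- non-positive entries leave A's state untouched: the fold runs over the filtered list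
lemma foldA_filter (l : List (Int × Int)) (s : List (Int × Int × Int) × Int × Int × Int) :
    l.foldl pvStepA s = (l.filter (fun p => p.2 > 0)).foldl pvStepA s := by
  induction l generalizing s with
  | nil => rfl
  | cons p rest ih =>
      by_cases h : p.2 > 0
      · simp [h, List.foldl_cons, ih]
      · have hs : pvStepA s p = s := by
          simp [pvStepA, h]
        simp [h, List.foldl_cons, hs, ih]

-- a whole run of equal positive values only increments the counter
lemma foldA_run (v : Int) (hv : 0 < v) :
    ∀ (g : List (Int × Int)), (∀ q ∈ g, q.2 = v) →
    ∀ (w : List (Int × Int × Int)) (c i : Int),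
      g.foldl pvStepA (w, c, v, i) = (w, c + (g.length : Int), v, i) := by
  intro g
  induction g with
  | nil => intro _ w c i; simp
  | cons q rest ih =>
      intro hmem w c i
      have hq : q.2 = v := hmem q (by simp)
      have hstep : pvStepA (w, c, v, i) q = (w, c + 1, v, i) := by
        simp [pvStepA, hq, hv, not_lt_of_gt hv]
      have hrest : ∀ r ∈ rest, r.2 = v := fun r hr => hmem r (by simp [hr])
      rw [List.foldl_cons, hstep, ih hrest]
      simp only [List.length_cons]
      push_cast
      ring_nf

-- unfolding pvOut on two leading groups / one group
lemma pvOut_single (g0 : List (Int × Int)) (L : Int) :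
    pvOut [g0] L = if g0.length > 1 then [(g0.headI.1, L, (g0.length : Int))] else [] := by
  split_ifs with h
  · simp [pvOut, h]
  · simp [pvOut, h]

lemma pvOut_cons (g0 g1 : List (Int × Int)) (R : List (List (Int × Int))) (L : Int) :
    pvOut (g0 :: g1 :: R) L =
      (if g0.length > 1 then [(g0.headI.1, g1.headI.1, (g0.length : Int))] else []) ++
        pvOut (g1 :: R) L := by
  simp only [pvOut, List.tail_cons, List.map_cons, List.cons_append, List.zip_cons_cons,
    List.filterMap_cons]
  split_ifs <;> simp


lemma pv_dropWhile_head_false {α : Type} (f : α → Bool) :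
    ∀ (l : List α) (q : α) (t : List α), l.dropWhile f = q :: t → f q = false := by
  intro l
  induction l with
  | nil => intro q t h; simp at h
  | cons a l ih =>
      intro q t h
      by_cases ha : f a
      · rw [List.dropWhile_cons_of_pos ha] at h
        exact ih q t h
      · rw [List.dropWhile_cons_of_neg ha] at h
        cases h
        simpa using ha

-- main loop invariant: from a fresh state, A's fold+finalize produces w ++ B's grouped output
lemma mainA (n : Nat) :
    ∀ (ps : List (Int × Int)), ps.length ≤ n → (∀ q ∈ ps, 0 < q.2) →
    ∀ (w : List (Int × Int × Int)) (L : Int),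
      pvFinA (ps.foldl pvStepA (w, 0, -1, 0)) L = w ++ pvOut (pyGroupBy ps) L := by
  induction n with
  | zero =>
      intro ps hlen _ w L
      have hnil : ps = [] := List.eq_nil_of_length_eq_zero (Nat.le_zero.mp hlen)
      subst hnil
      simp [pvFinA, pyGroupBy, pvOut]
  | succ n ih =>
      intro ps hlen hpos w L
      cases ps with
      | nil => simp [pvFinA, pyGroupBy, pvOut]
      | cons p rest =>
        have hp : 0 < p.2 := hpos p (by simp)
        have hsplit : rest = rest.takeWhile (fun q => q.2 == p.2) ++
            rest.dropWhile (fun q => q.2 == p.2) := (List.takeWhile_append_dropWhile).symm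
        have hstep1 : pvStepA (w, 0, -1, 0) p = (w, 1, p.2, p.1) := by
          simp [pvStepA, hp]
        have hgmem : ∀ q ∈ rest.takeWhile (fun q => q.2 == p.2), q.2 = p.2 := by
          intro q hq
          have := List.mem_takeWhile_imp hq
          simpa using this
        have hrun : (rest.takeWhile (fun q => q.2 == p.2)).foldl pvStepA (w, 1, p.2, p.1) =
            (w, 1 + ((rest.takeWhile (fun q => q.2 == p.2)).length : Int), p.2, p.1) :=
          foldA_run p.2 hp _ hgmem w 1 p.1
        have hGB : pyGroupBy (p :: rest) =
            (p :: rest.takeWhile (fun q => q.2 == p.2)) ::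
              pyGroupBy (rest.dropWhile (fun q => q.2 == p.2)) := by
          rw [pyGroupBy]
        rw [List.foldl_cons, hstep1, hGB]
        conv_lhs => rw [hsplit]
        rw [List.foldl_append, hrun]
        cases hd : rest.dropWhile (fun q => q.2 == p.2) with
        | nil =>
            have hGBnil : pyGroupBy ([] : List (Int × Int)) = [] := by rw [pyGroupBy]
            rw [hGBnil, pvOut_single]
            simp only [List.foldl_nil, pvFinA, List.headI, List.length_cons]
            by_cases hg : 0 < (rest.takeWhile (fun q => q.2 == p.2)).length
            · rw [if_pos (by exact_mod_cast by omega), if_pos (by omega)]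
              simp only [Nat.cast_add, Nat.cast_one]
              rw [add_comm (1 : Int)]
            · rw [if_neg (by exact_mod_cast by omega), if_neg (by omega)]
              simp
        | cons q d' =>
            have hqmem : q ∈ rest := by
              have : q ∈ rest.dropWhile (fun q => q.2 == p.2) := by simp [hd]
              exact (List.dropWhile_sublist _).mem this
            have hq : 0 < q.2 := hpos q (by simp [hqmem])
            have hqp : ¬ q.2 = p.2 := by
              have := pv_dropWhile_head_false (fun q => q.2 == p.2) rest q d' hd
              simpa using this
            have hstep2 : pvStepA
                (w, 1 + ((rest.takeWhile (fun q => q.2 == p.2)).length : Int), p.2, p.1) q =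
                ((if (1 : Int) + ((rest.takeWhile (fun q => q.2 == p.2)).length : Int) > 1
                    then w ++ [(p.1, q.1, 1 + ((rest.takeWhile (fun q => q.2 == p.2)).length : Int))]
                    else w), 1, q.2, q.1) := by
              simp [pvStepA, hq, not_lt_of_gt hp, hqp]
            have hstep3 : ∀ (w' : List (Int × Int × Int)),
                pvStepA (w', 0, -1, 0) q = (w', 1, q.2, q.1) := by
              intro w'; simp [pvStepA, hq]
            have hlen' : (q :: d').length ≤ n := by
              have h1 : rest.length = (rest.takeWhile (fun q => q.2 == p.2)).length +
                  (rest.dropWhile (fun q => q.2 == p.2)).length := by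
                conv_lhs => rw [hsplit]
                rw [List.length_append]
              have h2 : (rest.dropWhile (fun q => q.2 == p.2)).length = (q :: d').length := by
                rw [hd]
              simp only [List.length_cons] at hlen
              omega
            have hpos' : ∀ r ∈ q :: d', 0 < r.2 := by
              intro r hr
              have : r ∈ rest.dropWhile (fun q => q.2 == p.2) := by rw [hd]; exact hr
              exact hpos r (by simp [(List.dropWhile_sublist _).mem this])
            have hIH := ih (q :: d') hlen' hpos'
              (if (1 : Int) + ((rest.takeWhile (fun q => q.2 == p.2)).length : Int) > 1
                then w ++ [(p.1, q.1, 1 + ((rest.takeWhile (fun q => q.2 == p.2)).length : Int))]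
                else w) L
            rw [List.foldl_cons, hstep2]
            rw [List.foldl_cons, hstep3] at hIH
            rw [hIH]
            have hGB2 : pyGroupBy (q :: d') =
                (q :: d'.takeWhile (fun r => r.2 == q.2)) ::
                  pyGroupBy (d'.dropWhile (fun r => r.2 == q.2)) := by
              rw [pyGroupBy]
            rw [hGB2, pvOut_cons, ← hGB2]
            simp only [List.headI, List.length_cons]
            by_cases hg : 0 < (rest.takeWhile (fun q => q.2 == p.2)).length
            · rw [if_pos (by exact_mod_cast by omega), if_pos (by omega)]
              simp only [Nat.cast_add, Nat.cast_one, List.append_assoc, List.singleton_append]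
              rw [add_comm (1 : Int)]
            · rw [if_neg (by exact_mod_cast by omega), if_neg (by omega)]
              simp

-- ===== VERDICT (by name: the statement is the Claim_ definition above) =====
theorem find_duplicate_length_ranges_spec : Claim_equal_find_duplicate_length_ranges := by
  intro l _
  unfold Spec_find_duplicate_length_ranges
  rw [alt_eq_pvOut, find_duplicate_length_ranges, foldA_filter]
  exact mainA ((PySem.List.enumerate l).filter (fun p => p.2 > 0)).length _ le_rfl
    (by intro q hq; have := List.of_mem_filter hq; simpa using this) [] _
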